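-- pv_equiv track=rewrite | github.com/OliverGregory/video-project-1 | scraper/tts_cleaner.py | find_natural_split
-- ===== SOURCE A (Python) =====
-- def find_natural_split(words: list) -> int:
--     """
--     Finds the best index at which to split a long list of words into two sentences.
--     Searches a window of ±8 words around the midpoint, preferring conjunctions.
--     Falls back to a comma position, then to a hard midpoint cut.
--
--     Parameters:
--         words : a list of word strings representing a single sentence
--
--     Returns:
--         An integer index — split the list at words[:index] and words[index:].
--     """
--
--     mid = len(words) // 2   # Ideal midpoint — we want splits as close to here as possible
--
--     # Search within ±8 words of the midpoint (clamped to valid indices)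
--     search_start = max(1, mid - 8)
--     search_end   = min(len(words) - 1, mid + 8)
--
--     # Words that make a natural sentence boundary when split before them
--     conjunctions = {'and', 'but', 'so', 'because', 'which', 'where',
--                     'while', 'although', 'however', 'therefore', 'thus',
--                     'since', 'unless', 'whereas'}
--
--     # Find the conjunction closest to the midpoint within the search window
--     best          = None
--     best_distance = float('inf')   # Start with "infinitely far away" so any real result beats it
--
--     for i in range(search_start, search_end):
--         word_clean = words[i].lower().rstrip('.,')   # Strip trailing punctuation before comparing
--         if word_clean in conjunctions:
--             distance = abs(i - mid)
--             if distance < best_distance: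
--                 best_distance = distance
--                 best = i
--
--     if best is not None:
--         return best   # Split just before the nearest conjunction
--
--     # No conjunction found — try splitting after a comma near the midpoint
--     for i in range(search_start, search_end):
--         if words[i].endswith(','):
--             return i + 1   # Split after the comma word
--
--     # Last resort: hard midpoint cut
--     return mid
-- ===== SOURCE B (Python) =====
-- def find_natural_split(words: list) -> int:
--     n = len(words)
--     mid = n // 2
--     lo = max(1, mid - 8)
--     hi = min(n - 1, mid + 8)   # window is the indices lo .. hi-1
--
--     conjunctions = {'and', 'but', 'so', 'because', 'which', 'where',
--                     'while', 'although', 'however', 'therefore', 'thus',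
--                     'since', 'unless', 'whereas'}
--
--     def is_conj(i):
--         return words[i].lower().rstrip('.,') in conjunctions
--
--     # Scan outward from the midpoint: distance 0, 1, 2, ... with the lower
--     # index tried first, so the first hit is the nearest conjunction
--     # (ties to the lower index) and we return immediately.
--     for d in range(9):
--         for i in (mid - d, mid + d):
--             if lo <= i < hi and is_conj(i):
--                 return i
--
--     # No conjunction found — split after the first comma word in the window
--     for i in range(lo, hi):
--         if words[i].endswith(','):
--             return i + 1
--
--     return mid
-- ===== Notes on version B (the rewrite author's own statement) =====
-- stated objective: alternative
-- what changed: Replaced A's left-to-right window scan that maintains best/best_distance with a center-outward scan from the midpoint (lower index first per distance) that returns the first matching conjunction immediately, with no best-tracking state.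
import Mathlib
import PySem

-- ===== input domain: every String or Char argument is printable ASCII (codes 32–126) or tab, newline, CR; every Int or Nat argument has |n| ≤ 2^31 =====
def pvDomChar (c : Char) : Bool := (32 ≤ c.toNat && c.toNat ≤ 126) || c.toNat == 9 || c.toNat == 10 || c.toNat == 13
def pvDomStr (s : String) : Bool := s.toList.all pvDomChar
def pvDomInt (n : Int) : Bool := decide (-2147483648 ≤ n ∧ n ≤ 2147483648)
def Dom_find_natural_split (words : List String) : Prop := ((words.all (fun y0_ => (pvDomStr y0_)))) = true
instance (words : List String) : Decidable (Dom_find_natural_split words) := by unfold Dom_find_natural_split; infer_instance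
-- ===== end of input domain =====

-- B replaces A's best/best_distance min-tracking scan of the midpoint window with a
-- center-outward first-match scan (alternative decomposition; same cost).

-- ===== PORT A =====
-- shared helper: the conjunction set (a Python set literal of distinct strings)
def pvConj : List (List Char) :=
  ["and".toList, "but".toList, "so".toList, "because".toList, "which".toList, "where".toList,
   "while".toList, "although".toList, "however".toList, "therefore".toList, "thus".toList,
   "since".toList, "unless".toList, "whereas".toList]

-- shared helper: words[i].lower().rstrip('.,') in conjunctions.
-- rstrip('.,') is ported by hand (drop trailing '.'/',' characters): exact for str.rstrip with chars.
def pvIsConj (words : List String) (i : Int) : Bool :=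
  let w := (PySem.List.pyGet? words i).getD ""   -- index is always in range at every call site
  let cleaned := ((PySem.Chars.lower w.toList).reverse.dropWhile (fun c => c == '.' || c == ',')).reverse
  pvConj.contains cleaned

-- A-side helper: the body of A's for-loop (best = None / best_distance = inf both encoded as none;
-- best_distance is finite exactly when best is set, so the pair (none, none) is Python's initial state)
def pvStepA (words : List String) (mid : Int) (st : Option Int × Option Int) (i : Int) :
    Option Int × Option Int :=
  if pvIsConj words i then
    let distance : Int := (i - mid).natAbs      -- abs(i - mid)
    let better : Bool := match st.2 with
      | none => true                            -- distance < float('inf')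
      | some bd => distance < bd
    if better then (some i, some distance) else st
  else st

def find_natural_split (words : List String) : Int :=
  let mid := PySem.Int.floordiv (words.length : Int) 2
  let search_start := max 1 (mid - 8)
  let search_end := min ((words.length : Int) - 1) (mid + 8)
  let st := (PySem.List.pyRange search_start search_end 1).foldl (pvStepA words mid) (none, none)
  match st.1 with
  | some best => best
  | none =>
    match (PySem.List.pyRange search_start search_end 1).find?
        (fun i => PySem.Str.endswith ((PySem.List.pyGet? words i).getD "") ",") with
    | some i => i + 1
    | none => mid

-- ===== PORT B =====
-- B-side helper: the outward scan 'for d in range(9): for i in (mid-d, mid+d): …'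
def pvScanOut (words : List String) (mid lo hi : Int) : List Int → Option Int
  | [] => none
  | d :: ds =>
    if lo ≤ mid - d ∧ mid - d < hi ∧ pvIsConj words (mid - d) = true then some (mid - d)
    else if lo ≤ mid + d ∧ mid + d < hi ∧ pvIsConj words (mid + d) = true then some (mid + d)
    else pvScanOut words mid lo hi ds

def find_natural_split_alt (words : List String) : Int :=
  let n : Int := words.length
  let mid := PySem.Int.floordiv n 2
  let lo := max 1 (mid - 8)
  let hi := min (n - 1) (mid + 8)
  match pvScanOut words mid lo hi (PySem.List.pyRange 0 9 1) with
  | some i => i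
  | none =>
    match (PySem.List.pyRange lo hi 1).find?
        (fun i => PySem.Str.endswith ((PySem.List.pyGet? words i).getD "") ",") with
    | some i => i + 1
    | none => mid

-- ===== PRECONDITION & SPEC =====
def Spec_find_natural_split (words : List String) (out : Int) : Prop := out = find_natural_split_alt words
instance (words : List String) (out : Int) : Decidable (Spec_find_natural_split words out) := by unfold Spec_find_natural_split; infer_instance

-- ===== CLAIM (what is proved, stated in full; the proofs are below) =====
def Claim_equal_find_natural_split : Prop := ∀ (words : List String), Dom_find_natural_split words → Spec_find_natural_split words (find_natural_split words)

-- ===== LEMMAS AND PROOFS =====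

-- proof-side: A's fold with only the best component (the stored distance is determined by it)
def pvBest (words : List String) (mid : Int) (b : Option Int) (i : Int) : Option Int :=
  if pvIsConj words i then
    match b with
    | none => some i
    | some j => if (i - mid).natAbs < (j - mid).natAbs then some i else b
  else b

-- "j is at least as good as i": closer to mid, or equally close with a lower index
def pvLe (mid j i : Int) : Prop :=
  (j - mid).natAbs < (i - mid).natAbs ∨ ((j - mid).natAbs = (i - mid).natAbs ∧ j ≤ i)

theorem pvCouple (words : List String) (mid : Int) (L : List Int) (b : Option Int) :
    L.foldl (pvStepA words mid) (b, b.map (fun j => ((j - mid).natAbs : Int)))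
      = (L.foldl (pvBest words mid) b,
         (L.foldl (pvBest words mid) b).map (fun j => ((j - mid).natAbs : Int))) := by
  induction L generalizing b with
  | nil => rfl
  | cons x L ih =>
    have hstep : pvStepA words mid (b, b.map (fun j => ((j - mid).natAbs : Int))) x
        = (pvBest words mid b x, (pvBest words mid b x).map (fun j => ((j - mid).natAbs : Int))) := by
      cases b with
      | none =>
        simp only [pvStepA, pvBest, Option.map_none]
        split_ifs <;> simp
      | some j =>
        simp only [pvStepA, pvBest, Option.map_some]
        by_cases hq : pvIsConj words x = true
        · simp only [hq, if_true]
          by_cases hlt : (x - mid).natAbs < (j - mid).natAbs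
          · have : (((x - mid).natAbs : Int) < ((j - mid).natAbs : Int)) := by exact_mod_cast hlt
            simp only [this, hlt, decide_true, if_true, if_pos hlt, Option.map_some]
          · have : ¬(((x - mid).natAbs : Int) < ((j - mid).natAbs : Int)) := by exact_mod_cast hlt
            simp only [this, hlt, decide_false, if_false, Bool.false_eq_true, if_neg hlt, Option.map_some]
        · simp [hq]
    simp only [List.foldl_cons, hstep, ih]

theorem pvBest_some_char (words : List String) (mid : Int) :
    ∀ (L : List Int), L.Pairwise (· < ·) → ∀ b j, (∀ i ∈ L, b < i) →
    L.foldl (pvBest words mid) (some b) = some j →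
    (j = b ∨ (j ∈ L ∧ pvIsConj words j = true)) ∧ pvLe mid j b ∧
      (∀ i ∈ L, pvIsConj words i = true → pvLe mid j i) := by
  intro L
  induction L with
  | nil =>
    intro _ b j _ h
    simp at h
    subst h
    exact ⟨Or.inl rfl, Or.inr ⟨rfl, le_refl _⟩, by simp⟩
  | cons x L ih =>
    intro hpw b j hb hfold
    have hpwL : L.Pairwise (· < ·) := hpw.of_cons
    have hxL : ∀ i ∈ L, x < i := fun i hi => (List.pairwise_cons.mp hpw).1 i hi
    have hbx : b < x := hb x (List.mem_cons_self)
    simp only [List.foldl_cons] at hfold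
    by_cases hq : pvIsConj words x = true
    · by_cases hlt : (x - mid).natAbs < (b - mid).natAbs
      · rw [show pvBest words mid (some b) x = some x by simp [pvBest, hq, hlt]] at hfold
        obtain ⟨hmem, hle, hall⟩ := ih hpwL x j hxL hfold
        refine ⟨?_, ?_, ?_⟩
        · rcases hmem with h | h
          · exact Or.inr ⟨by simp [h], h ▸ hq⟩
          · exact Or.inr ⟨List.mem_cons_of_mem _ h.1, h.2⟩
        · unfold pvLe at *; omega
        · intro i hi hqi
          rcases List.mem_cons.mp hi with rfl | hi'
          · exact hle
          · exact hall i hi' hqi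
      · rw [show pvBest words mid (some b) x = some b by simp [pvBest, hq, hlt]] at hfold
        obtain ⟨hmem, hle, hall⟩ := ih hpwL b j (fun i hi => lt_trans hbx (hxL i hi)) hfold
        refine ⟨?_, hle, ?_⟩
        · rcases hmem with h | h
          · exact Or.inl h
          · exact Or.inr ⟨List.mem_cons_of_mem _ h.1, h.2⟩
        · intro i hi hqi
          rcases List.mem_cons.mp hi with rfl | hi'
          · unfold pvLe at *; omega
          · exact hall i hi' hqi
    · rw [show pvBest words mid (some b) x = some b by simp [pvBest, hq]] at hfold
      obtain ⟨hmem, hle, hall⟩ := ih hpwL b j (fun i hi => lt_trans hbx (hxL i hi)) hfold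
      refine ⟨?_, hle, ?_⟩
      · rcases hmem with h | h
        · exact Or.inl h
        · exact Or.inr ⟨List.mem_cons_of_mem _ h.1, h.2⟩
      · intro i hi hqi
        rcases List.mem_cons.mp hi with rfl | hi'
        · exact absurd hqi hq
        · exact hall i hi' hqi

theorem pvBest_some_isSome (words : List String) (mid : Int) :
    ∀ (L : List Int) (b : Int), ∃ j, L.foldl (pvBest words mid) (some b) = some j := by
  intro L
  induction L with
  | nil => exact fun b => ⟨b, rfl⟩
  | cons x L ih =>
    intro b
    simp only [List.foldl_cons]
    obtain ⟨y, hy⟩ : ∃ y, pvBest words mid (some b) x = some y := by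
      unfold pvBest; split_ifs <;> simp <;> split_ifs <;> simp
    rw [hy]; exact ih y

theorem pvBest_none_char (words : List String) (mid : Int) :
    ∀ (L : List Int),
    L.foldl (pvBest words mid) none = none → ∀ i ∈ L, pvIsConj words i = false := by
  intro L
  induction L with
  | nil => simp
  | cons x L ih =>
    intro hfold i hi
    simp only [List.foldl_cons] at hfold
    by_cases hq : pvIsConj words x = true
    · rw [show pvBest words mid none x = some x by simp [pvBest, hq]] at hfold
      obtain ⟨j, hj⟩ := pvBest_some_isSome words mid L x
      rw [hj] at hfold; exact absurd hfold (by simp)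
    · rw [show pvBest words mid none x = none by simp [pvBest, hq]] at hfold
      rcases List.mem_cons.mp hi with rfl | hi'
      · exact Bool.not_eq_true _ |>.mp hq
      · exact ih hfold i hi'

theorem pvBest_none_some_char (words : List String) (mid : Int) :
    ∀ (L : List Int), L.Pairwise (· < ·) → ∀ j,
    L.foldl (pvBest words mid) none = some j →
    j ∈ L ∧ pvIsConj words j = true ∧ (∀ i ∈ L, pvIsConj words i = true → pvLe mid j i) := by
  intro L
  induction L with
  | nil => simp
  | cons x L ih =>
    intro hpw j hfold
    have hpwL : L.Pairwise (· < ·) := hpw.of_cons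
    have hxL : ∀ i ∈ L, x < i := fun i hi => (List.pairwise_cons.mp hpw).1 i hi
    simp only [List.foldl_cons] at hfold
    by_cases hq : pvIsConj words x = true
    · rw [show pvBest words mid none x = some x by simp [pvBest, hq]] at hfold
      obtain ⟨hmem, hle, hall⟩ := pvBest_some_char words mid L hpwL x j hxL hfold
      refine ⟨?_, ?_, ?_⟩
      · rcases hmem with h | h
        · simp [h]
        · exact List.mem_cons_of_mem _ h.1
      · rcases hmem with h | h
        · exact h ▸ hq
        · exact h.2
      · intro i hi hqi
        rcases List.mem_cons.mp hi with rfl | hi'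
        · exact hle
        · exact hall i hi' hqi
    · rw [show pvBest words mid none x = none by simp [pvBest, hq]] at hfold
      obtain ⟨hmem, hqj, hall⟩ := ih hpwL j hfold
      refine ⟨List.mem_cons_of_mem _ hmem, hqj, ?_⟩
      intro i hi hqi
      rcases List.mem_cons.mp hi with rfl | hi'
      · exact absurd hqi hq
      · exact hall i hi' hqi

theorem pvScan_none (words : List String) (mid lo hi : Int)
    (h : ∀ i, lo ≤ i → i < hi → pvIsConj words i = false) :
    ∀ ds, pvScanOut words mid lo hi ds = none := by
  intro ds
  induction ds with
  | nil => rfl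
  | cons d ds ih =>
    unfold pvScanOut
    rw [if_neg, if_neg]
    · exact ih
    · rintro ⟨h1, h2, h3⟩; rw [h (mid + d) h1 h2] at h3; exact absurd h3 (by simp)
    · rintro ⟨h1, h2, h3⟩; rw [h (mid - d) h1 h2] at h3; exact absurd h3 (by simp)

theorem pvScan_finds (words : List String) (mid lo hi : Int)
    (hlo : mid - 8 ≤ lo) (hhi : hi ≤ mid + 8) (j : Int)
    (hj1 : lo ≤ j) (hj2 : j < hi) (hjq : pvIsConj words j = true)
    (hmin : ∀ i, lo ≤ i → i < hi → pvIsConj words i = true → pvLe mid j i) :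
    ∀ (k : Nat) (d : Int), d + k = 9 → 0 ≤ d → d ≤ ((j - mid).natAbs : Int) →
    pvScanOut words mid lo hi (PySem.List.pyRange d 9 1) = some j := by
  intro k
  induction k with
  | zero => intro d h9 _ hd; omega
  | succ k ih =>
    intro d h9 hd0 hdle
    have hdlt : d < 9 := by omega
    rw [PySem.List.pyRange_one_cons hdlt]
    unfold pvScanOut
    by_cases heq : ((j - mid).natAbs : Int) = d
    · -- j is at distance d: it is mid - d or mid + d
      by_cases hjlow : j = mid - d
      · rw [if_pos ⟨hjlow ▸ hj1, hjlow ▸ hj2, hjlow ▸ hjq⟩, hjlow]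
      · have hjhigh : j = mid + d := by omega
        rw [if_neg, if_pos ⟨hjhigh ▸ hj1, hjhigh ▸ hj2, hjhigh ▸ hjq⟩, hjhigh]
        rintro ⟨h1, h2, h3⟩
        have := hmin (mid - d) h1 h2 h3
        unfold pvLe at this; omega
    · -- distance of j exceeds d: neither mid - d nor mid + d can match
      have hgt : d < ((j - mid).natAbs : Int) := by omega
      rw [if_neg, if_neg]
      · exact ih (d + 1) (by omega) (by omega) (by omega)
      · rintro ⟨h1, h2, h3⟩
        have := hmin (mid + d) h1 h2 h3
        unfold pvLe at this; omega
      · rintro ⟨h1, h2, h3⟩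
        have := hmin (mid - d) h1 h2 h3
        unfold pvLe at this; omega

theorem pvMain (words : List String) (mid lo hi : Int)
    (hlo : mid - 8 ≤ lo) (hhi : hi ≤ mid + 8) :
    (match ((PySem.List.pyRange lo hi 1).foldl (pvStepA words mid) (none, none)).1 with
     | some best => best
     | none => match (PySem.List.pyRange lo hi 1).find? (fun i => PySem.Str.endswith ((PySem.List.pyGet? words i).getD "") ",") with
               | some i => i + 1 | none => mid) =
    (match pvScanOut words mid lo hi (PySem.List.pyRange 0 9 1) with
     | some i => i
     | none => match (PySem.List.pyRange lo hi 1).find? (fun i => PySem.Str.endswith ((PySem.List.pyGet? words i).getD "") ",") with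
               | some i => i + 1 | none => mid) := by
  have hc := pvCouple words mid (PySem.List.pyRange lo hi 1) none
  simp only [Option.map_none] at hc
  rw [hc]
  have hpw := PySem.List.pairwise_lt_pyRange_one lo hi
  cases hr : (PySem.List.pyRange lo hi 1).foldl (pvBest words mid) none with
  | none =>
    have hnone : ∀ i, lo ≤ i → i < hi → pvIsConj words i = false := by
      intro i h1 h2
      exact pvBest_none_char words mid _ hr i (PySem.List.mem_pyRange_one.mpr ⟨h1, h2⟩)
    rw [pvScan_none words mid lo hi hnone]
  | some j =>
    obtain ⟨hmem, hqj, hall⟩ := pvBest_none_some_char words mid _ hpw j hr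
    obtain ⟨hj1, hj2⟩ := PySem.List.mem_pyRange_one.mp hmem
    have hscan := pvScan_finds words mid lo hi hlo hhi j hj1 hj2 hqj
      (fun i h1 h2 hq => hall i (PySem.List.mem_pyRange_one.mpr ⟨h1, h2⟩) hq)
      9 0 rfl (by omega) (by positivity)
    rw [hscan]

-- ===== VERDICT (by name: the statement is the Claim_ definition above) =====
theorem find_natural_split_spec : Claim_equal_find_natural_split := by
  intro words _
  show find_natural_split words = find_natural_split_alt words
  exact pvMain words (PySem.Int.floordiv ((words.length : Int)) 2)
    (max 1 (PySem.Int.floordiv ((words.length : Int)) 2 - 8))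
    (min ((words.length : Int) - 1) (PySem.Int.floordiv ((words.length : Int)) 2 + 8))
    (by omega) (by omega)
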